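-- pv_equiv track=rewrite | github.com/damilarelana/algorithms | parseStringToList.py | parseStringToList
-- ===== SOURCE A (Python) =====
-- def parseStringToList(inputString: str) -> list:  #
--     listOfStrings = inputString.split(" ")  # extract each string elements into a list
--     counter = 0 # counter is being used because the following were not working s.strip(), s = s.replace()
--     for s in listOfStrings: # using a for loop as it is fastest and constant in terms of time complexity i.e. better than list comprehension `list = [s for s in inputString]`
--         listOfStrings[counter].strip() # remove whitespaces around each element
--         listOfStrings[counter] = listOfStrings[counter].replace(',', '') # remove "," around each element
--         listOfStrings[counter] = listOfStrings[counter].replace('.', '') # remove "." around each element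
--         counter += 1
--     return listOfStrings
-- ===== SOURCE B (Python) =====
-- def parseStringToList(inputString: str) -> list:
--     # strip separators from the whole string once, then do the single structural split
--     return inputString.replace(',', '').replace('.', '').split(' ')
-- ===== Notes on version B (the rewrite author's own statement) =====
-- stated objective: simpler
-- what changed: B strips ',' and '.' from the whole string with two global replace passes and then splits once on ' ', replacing A's split-first counter-driven loop that re-indexes and rewrites each token in place (A's dead .strip() call is omitted; it discards its result).
import Mathlib
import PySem

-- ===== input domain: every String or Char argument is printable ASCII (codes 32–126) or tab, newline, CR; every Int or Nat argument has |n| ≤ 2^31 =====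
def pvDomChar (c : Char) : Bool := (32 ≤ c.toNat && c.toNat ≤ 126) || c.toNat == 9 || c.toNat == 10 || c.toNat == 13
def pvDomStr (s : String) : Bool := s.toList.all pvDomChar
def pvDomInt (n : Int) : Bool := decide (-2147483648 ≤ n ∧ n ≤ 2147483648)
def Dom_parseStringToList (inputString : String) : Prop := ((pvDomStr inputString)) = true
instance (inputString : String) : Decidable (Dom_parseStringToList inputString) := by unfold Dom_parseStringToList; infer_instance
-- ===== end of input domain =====

-- ===== PORT A =====
-- B strips ',' and '.' from the whole string first and then splits once, instead of A's
-- split-first counter loop; A's dead `.strip()` call (result discarded) is omitted — exact.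
def parseStringToList (inputString : String) : List String :=
  let listOfStrings := (PySem.Str.split? inputString " ").getD []  -- sep " " is nonempty, so split? is always `some`
  (listOfStrings.foldl (fun (st : List String × Nat) _s =>
      -- `listOfStrings[counter].strip()` : result discarded in the Python, no effect
      let l₁ := st.1.set st.2 (PySem.Str.replace (st.1.getD st.2 "") "," "")
      let l₂ := l₁.set st.2 (PySem.Str.replace (l₁.getD st.2 "") "." "")
      (l₂, st.2 + 1)) (listOfStrings, 0)).1

-- ===== PORT B =====
def parseStringToList_alt (inputString : String) : List String :=
  (PySem.Str.split? (PySem.Str.replace (PySem.Str.replace inputString "," "") "." "") " ").getD []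

-- ===== PRECONDITION & SPEC =====
def Spec_parseStringToList (inputString : String) (out : List String) : Prop := out = parseStringToList_alt inputString
instance (inputString : String) (out : List String) : Decidable (Spec_parseStringToList inputString out) := by unfold Spec_parseStringToList; infer_instance

-- ===== CLAIM (what is proved, stated in full; the proofs are below) =====
def Claim_equal_parseStringToList : Prop := ∀ (inputString : String), Dom_parseStringToList inputString → Spec_parseStringToList inputString (parseStringToList inputString)

-- ===== LEMMAS AND PROOFS =====

-- the token-cleaning function A applies to each token
def pvClean (s : String) : String :=
  PySem.Str.replace (PySem.Str.replace s "," "") "." ""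

-- reference splitter on a single space, for the proofs
def pvSplit : List Char → List (List Char)
  | [] => [[]]
  | c :: t => if c = ' ' then [] :: pvSplit t else (pvSplit t).modifyHead (c :: ·)

theorem pvSplit_ne_nil (cs : List Char) : pvSplit cs ≠ [] := by
  cases cs with
  | nil => simp [pvSplit]
  | cons c t =>
    simp only [pvSplit]
    split
    · simp
    · exact fun h => (pvSplit t).modifyHead_eq_nil_iff.mp h |> pvSplit_ne_nil t

theorem splitOn_go_eq (fuel : Nat) (l cur : List Char) (acc : List (List Char))
    (h : l.length ≤ fuel) :
    PySem.Chars.splitOn.go [' '] fuel l cur acc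
      = acc.reverse ++ (pvSplit l).modifyHead (cur.reverse ++ ·) := by
  induction fuel generalizing l cur acc with
  | zero =>
    interval_cases hl : l.length
    all_goals simp_all [PySem.Chars.splitOn.go, pvSplit, List.length_eq_zero_iff]
  | succ fuel ih =>
    cases l with
    | nil => simp [PySem.Chars.splitOn.go, pvSplit]
    | cons c rest =>
      simp only [PySem.Chars.splitOn.go, List.isPrefixOf, Bool.and_true]
      by_cases hc : c = ' '
      · subst hc
        simp only [beq_self_eq_true, if_pos, List.length_cons, List.drop_succ_cons,
          List.drop_zero, List.length_nil]
        rw [ih rest [] (cur.reverse :: acc) (by simpa using Nat.lt_succ_iff.mp (by simpa using h))]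
        obtain ⟨hd, tl, hr⟩ := List.exists_cons_of_ne_nil (pvSplit_ne_nil rest)
        simp [pvSplit, hr]
      · have : (' ' == c) = false := by simpa using fun h => hc h.symm
        simp only [this, Bool.false_eq_true, if_false]
        rw [ih rest (c :: cur) acc (by simpa using Nat.lt_succ_iff.mp (by simpa using h))]
        have hne := pvSplit_ne_nil rest
        obtain ⟨hd, tl, hrest⟩ := List.exists_cons_of_ne_nil hne
        simp [pvSplit, hc, hrest]

theorem splitOn_eq_pvSplit (cs : List Char) :
    PySem.Chars.splitOn cs [' '] = pvSplit cs := by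
  have hne := pvSplit_ne_nil cs
  obtain ⟨hd, tl, hcs⟩ := List.exists_cons_of_ne_nil hne
  rw [PySem.Chars.splitOn, splitOn_go_eq _ _ _ _ (Nat.le_succ _)]
  cases pvSplit cs <;> simp

theorem replace_go_eq (x : Char) (fuel : Nat) (l acc : List Char) (h : l.length ≤ fuel) :
    PySem.Chars.replace.go [x] [] fuel l acc = acc.reverse ++ l.filter (· != x) := by
  induction fuel generalizing l acc with
  | zero =>
    interval_cases hl : l.length
    all_goals simp_all [PySem.Chars.replace.go, List.length_eq_zero_iff]
  | succ fuel ih =>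
    cases l with
    | nil => simp [PySem.Chars.replace.go]
    | cons c rest =>
      simp only [PySem.Chars.replace.go, List.isPrefixOf, Bool.and_true]
      have hle : rest.length ≤ fuel := Nat.lt_succ_iff.mp (by simpa using h)
      by_cases hc : c = x
      · subst hc
        simp only [beq_self_eq_true, if_pos, List.length_cons, List.drop_succ_cons,
          List.drop_zero, List.length_nil, List.reverse_nil, List.nil_append]
        rw [ih rest acc hle]; simp
      · have : (x == c) = false := by simpa using fun h => hc h.symm
        simp only [this, Bool.false_eq_true, if_false]
        rw [ih rest (c :: acc) hle]
        simp [hc]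

theorem replace_single_eq_filter (cs : List Char) (x : Char) :
    PySem.Chars.replace cs [x] [] = cs.filter (· != x) := by
  rw [PySem.Chars.replace]
  simp only [List.isEmpty_cons, Bool.false_eq_true, if_false]
  exact (replace_go_eq x cs.length cs [] le_rfl).trans (by simp)

theorem pvSplit_filter (p : Char → Bool) (hp : p ' ' = true) (cs : List Char) :
    pvSplit (cs.filter p) = (pvSplit cs).map (List.filter p) := by
  induction cs with
  | nil => simp [pvSplit]
  | cons c t ih =>
    obtain ⟨hd, tl, ht⟩ := List.exists_cons_of_ne_nil (pvSplit_ne_nil t)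
    by_cases hc : c = ' '
    · subst hc
      simp [pvSplit, hp, ih]
    · by_cases hpc : p c = true
      · simp [pvSplit, hc, hpc, ih, ht]
      · simp only [Bool.not_eq_true] at hpc
        simp [pvSplit, hc, hpc, ih, ht]

-- A's loop computes the map of pvClean over the split list
theorem foldA_eq_map {α : Type} (ms : List α) (l : List String) (c : Nat)
    (h : l.length = c + ms.length) :
    (ms.foldl (fun (st : List String × Nat) _s =>
      let l₁ := st.1.set st.2 (PySem.Str.replace (st.1.getD st.2 "") "," "")
      let l₂ := l₁.set st.2 (PySem.Str.replace (l₁.getD st.2 "") "." "")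
      (l₂, st.2 + 1)) (l, c)).1 = l.take c ++ (l.drop c).map pvClean := by
  induction ms generalizing l c with
  | nil =>
    simp only [List.length_nil] at h
    simp only [List.foldl_nil]
    rw [List.drop_of_length_le (by omega), List.take_of_length_le (by omega)]
    simp
  | cons m ms ih =>
    have hc : c < l.length := by simp at h; omega
    simp only [List.foldl_cons]
    have hget1 : l.getD c "" = l[c] := by
      simp [List.getD_eq_getElem?_getD, List.getElem?_eq_getElem hc]
    have hget2 : (l.set c (PySem.Str.replace l[c] "," "")).getD c ""
        = PySem.Str.replace l[c] "," "" := by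
      simp [List.getD_eq_getElem?_getD, List.getElem?_set_self', List.getElem?_eq_getElem hc]
    rw [show (l.set c (PySem.Str.replace (l.getD c "") "," "")).set c
        (PySem.Str.replace ((l.set c (PySem.Str.replace (l.getD c "") "," "")).getD c "") "." "")
        = l.set c (pvClean l[c]) by rw [hget1, hget2, List.set_set]; rfl]
    rw [ih _ _ (by simp at h ⊢; omega)]
    rw [List.drop_set_of_lt (by omega)]
    rw [List.set_eq_take_append_cons_drop, if_pos hc]
    have hm : c < (l.map pvClean).length := by simpa using hc
    rw [show (l.drop c).map pvClean = (l.map pvClean).drop c by simp,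
        List.drop_eq_getElem_cons hm, List.take_append, List.length_take,
        Nat.min_eq_left hc.le, List.take_take]
    simp

-- ===== VERDICT (by name: the statement is the Claim_ definition above) =====
theorem parseStringToList_spec : Claim_equal_parseStringToList := by
  intro s _
  show parseStringToList s = parseStringToList_alt s
  unfold parseStringToList parseStringToList_alt
  rw [foldA_eq_map _ _ 0 (by simp)]
  simp only [List.take_zero, List.drop_zero, List.nil_append,
    PySem.Str.split?, PySem.Chars.split?, PySem.Str.replace,
    show (" ".toList : List Char) = [' '] from rfl,
    show (",".toList : List Char) = [','] from rfl,
    show (".".toList : List Char) = ['.'] from rfl,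
    show ("".toList : List Char) = [] from rfl,
    List.isEmpty_cons, Bool.false_eq_true, if_false,
    Option.map_some, Option.getD_some]
  simp only [splitOn_eq_pvSplit, replace_single_eq_filter, String.toList_ofList]
  rw [pvSplit_filter (· != '.') (by decide), pvSplit_filter (· != ',') (by decide)]
  simp only [List.map_map, List.map_inj_left, Function.comp]
  intro a _
  simp [pvClean, PySem.Str.replace, replace_single_eq_filter]
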